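-- pv_equiv track=rewrite | github.com/edoriggio/algorithms-and-data-structures | exercises/high_power_run.py | high_power_run_n
-- ===== SOURCE A (Python) =====
-- def high_power_run_n(A, h, t):
--     start = 0
--     gain = 0
--     max_gain = 0
--
--     for i in range(1, len(A)):
--         if A[i] > A[i - 1]:
--             gain += A[i] - A[i - 1]
--
--         if i >= t + 1:
--             start += 1
--
--         if start >= 1 and A[start] > A[start - 1]:
--             gain -= A[start] - A[start - 1]
--
--         if gain > max_gain:
--             max_gain = gain
--
--     if max_gain >= h:
--         return True
--
--     return False
-- ===== SOURCE B (Python) =====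
-- def high_power_run_n(A, h, t):
--     n = len(A)
--     g = [max(0, A[i] - A[i - 1]) for i in range(1, n)]
--     P = [0]
--     for x in g:
--         P.append(P[-1] + x)
--     best = 0
--     for i in range(1, n):
--         w = max(0, min(t, i))
--         best = max(best, P[i] - P[i - w])
--     return best >= h
-- ===== Notes on version B (the rewrite author's own statement) =====
-- stated objective: alternative
-- what changed: Replaces A's incremental sliding-window state machine (add the new gain, advance start, subtract the gain leaving the window) with a build-then-query shape: a gains array g[i]=max(0,A[i]-A[i-1]), a prefix-sum table P, and a scan taking the max of P[i]-P[i-w] per window.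
import Mathlib
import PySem

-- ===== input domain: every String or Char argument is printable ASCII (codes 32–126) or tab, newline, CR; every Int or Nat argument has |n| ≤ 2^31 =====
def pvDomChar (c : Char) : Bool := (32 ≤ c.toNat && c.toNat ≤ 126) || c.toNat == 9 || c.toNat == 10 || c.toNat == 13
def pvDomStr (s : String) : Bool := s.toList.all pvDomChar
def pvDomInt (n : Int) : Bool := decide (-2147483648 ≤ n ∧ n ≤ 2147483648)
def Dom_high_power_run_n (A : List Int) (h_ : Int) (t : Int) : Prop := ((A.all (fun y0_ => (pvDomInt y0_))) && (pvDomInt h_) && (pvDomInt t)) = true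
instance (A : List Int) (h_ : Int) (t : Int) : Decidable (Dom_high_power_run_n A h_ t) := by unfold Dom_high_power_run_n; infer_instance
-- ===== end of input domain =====

-- B replaces A's incremental sliding-window add/subtract with a gains array + prefix-sum table
-- queried per window (objective: alternative decomposition, same O(n) cost).

-- ===== PORT A =====
-- A-side helper: the body of A's single loop (state = (start, gain, max_gain))
def hprStepA (A : List Int) (t : Int) (s : Int × Int × Int) (i : Int) : Int × Int × Int :=
  let gain := if PySem.List.pyGetD A i 0 > PySem.List.pyGetD A (i-1) 0
              then s.2.1 + (PySem.List.pyGetD A i 0 - PySem.List.pyGetD A (i-1) 0) else s.2.1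
  let start := if i ≥ t + 1 then s.1 + 1 else s.1
  let gain := if start ≥ 1 ∧ PySem.List.pyGetD A start 0 > PySem.List.pyGetD A (start-1) 0
              then gain - (PySem.List.pyGetD A start 0 - PySem.List.pyGetD A (start-1) 0) else gain
  let mg := if gain > s.2.2 then gain else s.2.2
  (start, gain, mg)

def high_power_run_n (A : List Int) (h_ : Int) (t : Int) : Bool :=
  decide (((PySem.List.pyRange 1 A.length).foldl (hprStepA A t) (0, 0, 0)).2.2 ≥ h_)

-- ===== PORT B =====
-- B-side helpers: the gains array g, the prefix-sum table P, and the max-tracking loop body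
def hprGains (A : List Int) : List Int :=
  (PySem.List.pyRange 1 A.length).map
    (fun i => max 0 (PySem.List.pyGetD A i 0 - PySem.List.pyGetD A (i-1) 0))

def hprPrefix (g : List Int) : List Int :=
  g.foldl (fun acc x => acc ++ [PySem.List.pyGetD acc (-1) 0 + x]) [0]

def hprStepB (P : List Int) (t : Int) (b : Int) (i : Int) : Int :=
  max b (PySem.List.pyGetD P i 0 - PySem.List.pyGetD P (i - max 0 (min t i)) 0)

def high_power_run_n_alt (A : List Int) (h_ : Int) (t : Int) : Bool :=
  let P := hprPrefix (hprGains A)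
  decide ((PySem.List.pyRange 1 A.length).foldl (hprStepB P t) 0 ≥ h_)

-- ===== PRECONDITION & SPEC =====
def Spec_high_power_run_n (A : List Int) (h_ : Int) (t : Int) (out : Bool) : Prop := out = high_power_run_n_alt A h_ t
instance (A : List Int) (h_ : Int) (t : Int) (out : Bool) : Decidable (Spec_high_power_run_n A h_ t out) := by unfold Spec_high_power_run_n; infer_instance

-- ===== CLAIM (what is proved, stated in full; the proofs are below) =====
def Claim_equal_high_power_run_n : Prop := ∀ (A : List Int) (h_ : Int) (t : Int), Dom_high_power_run_n A h_ t → Spec_high_power_run_n A h_ t (high_power_run_n A h_ t)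

-- ===== LEMMAS AND PROOFS =====

-- uphill gain at step i (0 for i = 0)
def gN (A : List Int) (i : Nat) : Int := max 0 (A.getD i 0 - A.getD (i-1) 0)

-- prefix sums of the gains
def PN (A : List Int) : Nat → Int
  | 0 => 0
  | k+1 => PN A k + gN A (k+1)

-- running maximum of the window sums, window left edge = k - min k T
def MN (A : List Int) (T : Nat) : Nat → Int
  | 0 => 0
  | k+1 => max (MN A T k) (PN A (k+1) - PN A ((k+1) - min (k+1) T))

def scanFrom (v : Int) : List Int → List Int
  | [] => []
  | x :: xs => (v + x) :: scanFrom (v + x) xs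

lemma pyGetD_neg_one (xs : List Int) (h : xs ≠ []) :
    PySem.List.pyGetD xs (-1) 0 = xs.getLastD 0 := by
  have hl : 1 ≤ xs.length := List.length_pos_iff.mpr h
  simp [PySem.List.pyGetD, PySem.List.pyGet?, PySem.List.pyIdx?, hl,
    List.getLastD_eq_getLast?, List.getLast?_eq_getElem?,
    List.getElem?_eq_getElem (by omega : xs.length - 1 < xs.length)]

lemma hprPrefix_build (xs : List Int) : ∀ (acc : List Int), acc ≠ [] →
    xs.foldl (fun a x => a ++ [PySem.List.pyGetD a (-1) 0 + x]) acc
      = acc ++ scanFrom (acc.getLastD 0) xs := by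
  induction xs with
  | nil => intro acc h; simp [scanFrom]
  | cons x xs ih =>
      intro acc h
      simp only [List.foldl_cons, scanFrom]
      rw [pyGetD_neg_one acc h, ih (acc ++ [acc.getLastD 0 + x]) (by simp)]
      simp

lemma scanFrom_getD : ∀ (g : List Int) (v : Int) (j : Nat), j < g.length →
    (scanFrom v g).getD j 0 = v + (g.take (j+1)).sum := by
  intro g
  induction g with
  | nil => intro v j h; simp at h
  | cons x xs ih =>
      intro v j h
      cases j with
      | zero => simp [scanFrom]
      | succ j =>
          simp only [scanFrom, List.getD_cons_succ, List.take_succ_cons, List.sum_cons]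
          rw [ih (v + x) j (by simpa using h)]
          ring

lemma hprPrefix_getD (g : List Int) (j : Nat) (hj : j ≤ g.length) :
    (hprPrefix g).getD j 0 = (g.take j).sum := by
  unfold hprPrefix
  rw [hprPrefix_build g [0] (by simp)]
  have e : ([(0:Int)]).getLastD 0 = 0 := rfl
  rw [e]
  cases j with
  | zero => simp
  | succ j =>
      have : ([(0:Int)] ++ scanFrom 0 g).getD (j+1) 0 = (scanFrom 0 g).getD j 0 := by simp
      rw [this, scanFrom_getD g 0 j (by omega)]
      simp

lemma hprGains_length (A : List Int) : (hprGains A).length = A.length - 1 := by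
  unfold hprGains
  rw [List.length_map, PySem.List.length_pyRange_one]
  omega

lemma hprGains_getD (A : List Int) (j : Nat) (hj : j + 1 < A.length) :
    (hprGains A).getD j 0 = gN A (j+1) := by
  rw [← PySem.List.pyGetD_natCast]
  unfold hprGains
  rw [PySem.List.pyGetD_map_pyRange_one _ 1 (A.length:Int) j 0 (by omega)]
  unfold gN
  have e1 : (1:Int) + (j:Int) = ((j+1 : Nat) : Int) := by push_cast; ring
  have e2 : ((j+1 : Nat) : Int) - 1 = ((j : Nat) : Int) := by push_cast; ring
  rw [e1, e2, PySem.List.pyGetD_natCast, PySem.List.pyGetD_natCast]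
  simp

lemma take_sum_eq_PN (A : List Int) : ∀ (j : Nat), j < A.length →
    ((hprGains A).take j).sum = PN A j := by
  intro j
  induction j with
  | zero => intro _; simp [PN]
  | succ j ih =>
      intro hj
      have hlen : j < (hprGains A).length := by rw [hprGains_length]; omega
      rw [List.sum_take_succ _ _ hlen, ih (by omega)]
      have : (hprGains A)[j] = (hprGains A).getD j 0 := by
        rw [List.getD_eq_getElem _ _ hlen]
      rw [this, hprGains_getD A j (by omega)]
      rfl

lemma ite_gt_max (a b : Int) : (if a > b then a else b) = max b a := by
  rw [max_def]; split_ifs <;> omega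


lemma gN_eq (A : List Int) (i : Nat) :
    gN A i = if A.getD i 0 > A.getD (i-1) 0 then A.getD i 0 - A.getD (i-1) 0 else 0 := by
  unfold gN; rw [max_def]; split_ifs <;> omega

lemma foldA_inv (A : List Int) (t : Int) : ∀ (k : Nat),
    (PySem.List.pyRange 1 ((k : Int) + 1)).foldl (hprStepA A t) (0, 0, 0)
      = (((k - min k t.toNat : Nat) : Int),
         PN A k - PN A (k - min k t.toNat),
         MN A t.toNat k) := by
  intro k
  induction k with
  | zero => simp [PN, MN]
  | succ k ih =>
      rw [show ((k+1:Nat):Int) + 1 = ((k:Int)+1) + 1 by push_cast; ring,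
          PySem.List.pyRange_one_succ_right (by omega), List.foldl_append, ih]
      simp only [List.foldl_cons, List.foldl_nil]
      simp only [hprStepA]
      have e1 : (k:Int) + 1 = ((k+1:Nat):Int) := by push_cast; ring
      have e2 : ((k+1:Nat):Int) - 1 = ((k:Nat):Int) := by push_cast; ring
      rw [e1, e2, PySem.List.pyGetD_natCast, PySem.List.pyGetD_natCast]
      have hP1 : PN A (k+1) = PN A k + gN A (k+1) := rfl
      by_cases hc : t ≤ (k:Int)
      · -- window slides: start increments and the gain at the new start is removed
        have hT : t.toNat ≤ k := by omega
        rw [if_pos (by push_cast; omega : ((k+1:Nat):Int) ≥ t + 1)]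
        set s := k - min k t.toNat with hs
        have hs1 : ((s:Nat):Int) + 1 = ((s+1:Nat):Int) := by push_cast; ring
        have hs2 : ((s+1:Nat):Int) - 1 = ((s:Nat):Int) := by push_cast; ring
        rw [hs1, hs2, PySem.List.pyGetD_natCast, PySem.List.pyGetD_natCast]
        have hP2 : PN A (s+1) = PN A s + gN A (s+1) := rfl
        have hsk : (k+1) - min (k+1) t.toNat = s + 1 := by omega
        simp only [Prod.mk.injEq]
        refine ⟨by push_cast; omega, ?_, ?_⟩
        · rw [hsk, hP1, hP2, gN_eq, gN_eq]
          simp only [Nat.add_sub_cancel]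
          split_ifs <;> omega
        · rw [ite_gt_max]
          simp only [MN]
          congr 1
          rw [hsk, hP1, hP2, gN_eq, gN_eq]
          simp only [Nat.add_sub_cancel]
          split_ifs <;> omega
      · -- window not yet full: start stays 0 and nothing is removed
        have hT : k < t.toNat := by omega
        rw [if_neg (by push_cast; omega : ¬ ((k+1:Nat):Int) ≥ t + 1)]
        have hs0 : k - min k t.toNat = 0 := by omega
        have hsk : (k+1) - min (k+1) t.toNat = 0 := by omega
        rw [hs0]
        rw [if_neg (fun h => absurd h.1 (by norm_num))]
        simp only [Prod.mk.injEq]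
        refine ⟨by push_cast; omega, ?_, ?_⟩
        · rw [hsk, hP1, gN_eq]
          simp only [Nat.add_sub_cancel]
          split_ifs <;> omega
        · rw [ite_gt_max]
          simp only [MN]
          congr 1
          rw [hsk, hP1, gN_eq]
          simp only [Nat.add_sub_cancel]
          split_ifs <;> omega

lemma foldB_inv (A : List Int) (t : Int) : ∀ (k : Nat), k + 1 ≤ A.length →
    (PySem.List.pyRange 1 ((k : Int) + 1)).foldl (hprStepB (hprPrefix (hprGains A)) t) 0
      = MN A t.toNat k := by
  intro k
  induction k with
  | zero => intro _; simp [MN]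
  | succ k ih =>
      intro hk
      rw [show ((k+1:Nat):Int) + 1 = ((k:Int)+1) + 1 by push_cast; ring,
          PySem.List.pyRange_one_succ_right (by omega), List.foldl_append, ih (by omega)]
      simp only [List.foldl_cons, List.foldl_nil]
      simp only [hprStepB]
      have glen : (hprGains A).length = A.length - 1 := hprGains_length A
      have e1 : (k:Int) + 1 = ((k+1:Nat):Int) := by push_cast; ring
      have e2 : ((k+1:Nat):Int) - max 0 (min t ((k+1:Nat):Int))
          = (((k+1) - min (k+1) t.toNat : Nat):Int) := by push_cast; omega
      rw [e1, e2, PySem.List.pyGetD_natCast, PySem.List.pyGetD_natCast,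
          hprPrefix_getD _ _ (by omega), hprPrefix_getD _ _ (by omega),
          take_sum_eq_PN A (k+1) (by omega), take_sum_eq_PN A _ (by omega)]
      rfl

-- ===== VERDICT (by name: the statement is the Claim_ definition above) =====
theorem high_power_run_n_spec : Claim_equal_high_power_run_n := by
  intro A h_ t _
  unfold Spec_high_power_run_n high_power_run_n high_power_run_n_alt
  cases hn : A.length with
  | zero => simp
  | succ m =>
      have h1 : ((m + 1 : Nat) : Int) = (m : Int) + 1 := by push_cast; ring
      rw [h1, foldA_inv]; simp only [foldB_inv A t m (by omega)]
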